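-- pv_equiv track=rewrite | github.com/JadielTeofilo/General-Algorithms | src/interviewbit/hash/longest_subarray_lenght.py | solve
-- ===== SOURCE A (Python) =====
-- from typing import List, Dict
--
-- def solve(numbers: List[int]) -> int:
--     result: int = 0
--     cache: Dict[int, int] = {}
--     cache[0] = -1
--     last: int = 0
--     for index, number in enumerate(numbers):
--         curr: int = last + (1 if number == 1 else -1)
--         if curr not in cache:
--             cache[curr] = index
--         if curr - 1 in cache:
--             result = max(
--                 result, index - cache[curr - 1]
--             )
--         last = curr
--     return result
-- ===== SOURCE B (Python) =====
-- from typing import List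
--
--
-- def solve(numbers: List[int]) -> int:
--     # Brute force: for each suffix, scan for the longest prefix whose
--     # signed sum (1 for ones, -1 otherwise) equals 1.
--     result = 0
--     rest = numbers
--     while rest:
--         s = 0
--         length = 0
--         best = 0
--         for x in rest:
--             s += 1 if x == 1 else -1
--             length += 1
--             if s == 1:
--                 best = length
--         result = max(result, best)
--         rest = rest[1:]
--     return result
-- ===== Notes on version B (the rewrite author's own statement) =====
-- stated objective: simpler
-- what changed: Replaced the prefix-sum hashmap of first occurrences by a plain brute-force scan: for every start position scan the suffix with a running signed sum and record the longest window whose sum is 1.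
import Mathlib
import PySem

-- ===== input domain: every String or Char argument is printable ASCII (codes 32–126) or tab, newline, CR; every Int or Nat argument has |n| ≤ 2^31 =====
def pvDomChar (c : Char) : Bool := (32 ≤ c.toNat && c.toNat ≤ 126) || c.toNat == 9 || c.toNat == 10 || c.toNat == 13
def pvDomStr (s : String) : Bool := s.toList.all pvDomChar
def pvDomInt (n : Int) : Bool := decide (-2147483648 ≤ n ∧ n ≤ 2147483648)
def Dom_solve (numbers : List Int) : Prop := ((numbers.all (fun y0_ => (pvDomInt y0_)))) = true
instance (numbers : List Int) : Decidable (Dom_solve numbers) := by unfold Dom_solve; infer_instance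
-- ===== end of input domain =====

-- B replaces A's prefix-sum/first-occurrence hashmap by a plain brute-force
-- suffix scan: simpler, no dictionary (O(n^2) instead of O(n), not faster).


-- ===== PORT A =====
-- one step of A's loop; state = (result, cache, last), item = (index, number)
def stepA (st : Int × PySem.Dict Int Int × Int) (pr : Int × Int) : Int × PySem.Dict Int Int × Int :=
  let curr : Int := st.2.2 + (if pr.2 = 1 then 1 else -1)
  let cache := if st.2.1.contains curr then st.2.1 else st.2.1.insert curr pr.1
  let result :=
    match cache.get? (curr - 1) with
    | some c => max st.1 (pr.1 - c)
    | none => st.1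
  (result, cache, curr)

def solve (numbers : List Int) : Int :=
  ((PySem.List.enumerate numbers).foldl stepA (0, PySem.Dict.empty.insert 0 (-1), 0)).1

-- ===== PORT B =====
-- inner for-loop of B; state = (s, length, best)
def stepB (st : Int × Int × Int) (x : Int) : Int × Int × Int :=
  let s := st.1 + (if x = 1 then 1 else -1)
  let len := st.2.1 + 1
  (s, len, if s = 1 then len else st.2.2)

def bestPrefix (rest : List Int) : Int := (rest.foldl stepB (0, 0, 0)).2.2

-- B's while loop: rest shrinks by one from the front
def solveLoop (result : Int) : List Int → Int
  | [] => result
  | x :: xs => solveLoop (max result (bestPrefix (x :: xs))) xs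

def solve_alt (numbers : List Int) : Int := solveLoop 0 numbers

-- ===== PRECONDITION & SPEC =====
def Spec_solve (numbers : List Int) (out : Int) : Prop := out = solve_alt numbers
instance (numbers : List Int) (out : Int) : Decidable (Spec_solve numbers out) := by unfold Spec_solve; infer_instance

-- ===== CLAIM (what is proved, stated in full; the proofs are below) =====
def Claim_equal_solve : Prop := ∀ (numbers : List Int), Dom_solve numbers → Spec_solve numbers (solve numbers)

-- ===== LEMMAS AND PROOFS =====

-- signed value of an element
def t (x : Int) : Int := if x = 1 then 1 else -1

-- signed sum of a list
def S (l : List Int) : Int := (l.map t).sum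

-- length of the longest suffix with signed sum 1
def E : List Int → Int
  | [] => 0
  | x :: xs => if S (x :: xs) = 1 then ((x :: xs).length : Int) else E xs

-- max over all suffixes of bestPrefix
def Mx : List Int → Int
  | [] => 0
  | x :: xs => max (bestPrefix (x :: xs)) (Mx xs)

-- index (as Int) of the first k with S (p.take k) = v, if any
def firstK : List Int → Int → Option Int
  | [], v => if v = 0 then some 0 else none
  | y :: q, v => if v = 0 then some 0 else (firstK q (v - t y)).map (· + 1)

theorem S_nil : S [] = 0 := rfl
theorem S_cons (x : Int) (l : List Int) : S (x :: l) = t x + S l := by simp [S]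
theorem S_append (l m : List Int) : S (l ++ m) = S l + S m := by simp [S]

theorem foldB_fst (ys : List Int) : ∀ st : Int × Int × Int,
    (ys.foldl stepB st).1 = st.1 + S ys := by
  induction ys with
  | nil => intro st; simp [S]
  | cons y ys ih => intro st; simp [List.foldl, ih, stepB, S_cons, t]; ring

theorem foldB_len (ys : List Int) : ∀ st : Int × Int × Int,
    (ys.foldl stepB st).2.1 = st.2.1 + (ys.length : Int) := by
  induction ys with
  | nil => intro st; simp
  | cons y ys ih => intro st; simp [List.foldl, ih, stepB]; ring

theorem foldB_best_bounds (ys : List Int) : ∀ st : Int × Int × Int,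
    0 ≤ st.2.2 → st.2.2 ≤ st.2.1 →
    0 ≤ (ys.foldl stepB st).2.2 ∧ (ys.foldl stepB st).2.2 ≤ st.2.1 + (ys.length : Int) := by
  induction ys with
  | nil => intro st h0 h1; simpa using ⟨h0, by omega⟩
  | cons y ys ih =>
    intro st h0 h1
    simp only [List.foldl_cons]
    have hlen : ((y :: ys).length : Int) = (ys.length : Int) + 1 := by simp
    have hst : (stepB st y).2.1 = st.2.1 + 1 := rfl
    rcases ih (stepB st y) (by simp only [stepB]; split_ifs <;> omega)
      (by simp only [stepB]; split_ifs <;> omega) with ⟨ha, hb⟩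
    rw [hst] at hb
    exact ⟨ha, by rw [hlen]; omega⟩

theorem bestPrefix_nonneg (ys : List Int) : 0 ≤ bestPrefix ys :=
  (foldB_best_bounds ys (0, 0, 0) (by norm_num) (by norm_num)).1

theorem bestPrefix_le (ys : List Int) : bestPrefix ys ≤ (ys.length : Int) := by
  have := (foldB_best_bounds ys (0, 0, 0) (by norm_num) (by norm_num)).2
  simpa [bestPrefix] using this

theorem bestPrefix_snoc (ys : List Int) (x : Int) :
    bestPrefix (ys ++ [x]) =
      if S (ys ++ [x]) = 1 then ((ys.length : Int) + 1) else bestPrefix ys := by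
  unfold bestPrefix
  rw [List.foldl_append]
  have h1 : (ys.foldl stepB (0, 0, 0)).1 = S ys := by simpa using foldB_fst ys (0, 0, 0)
  have h2 : (ys.foldl stepB (0, 0, 0)).2.1 = (ys.length : Int) := by
    simpa using foldB_len ys (0, 0, 0)
  simp only [List.foldl_cons, List.foldl_nil, stepB, h1, h2, S_append, S_cons, S_nil, t, add_zero]

theorem E_le (ys : List Int) : E ys ≤ (ys.length : Int) := by
  induction ys with
  | nil => simp [E]
  | cons y ys ih =>
    simp only [E]; split_ifs
    · simp
    · simp only [List.length_cons]; push_cast; omega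

theorem Mx_nonneg (ys : List Int) : 0 ≤ Mx ys := by
  induction ys with
  | nil => simp [Mx]
  | cons y ys ih => simp only [Mx]; exact le_max_of_le_right ih

theorem Mx_le (ys : List Int) : Mx ys ≤ (ys.length : Int) := by
  induction ys with
  | nil => simp [Mx]
  | cons y ys ih =>
    simp only [Mx, List.length_cons]
    have h1 := bestPrefix_le (y :: ys)
    simp only [List.length_cons] at h1
    push_cast at *
    omega

theorem Mx_snoc (p : List Int) (x : Int) :
    Mx (p ++ [x]) = max (Mx p) (E (p ++ [x])) := by
  induction p with
  | nil =>
    simp only [List.nil_append, Mx, E, S_cons, S_nil, bestPrefix, List.foldl_cons,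
      List.foldl_nil, stepB, t]
    norm_num
    split_ifs <;> simp_all
  | cons y q ih =>
    have hbp := bestPrefix_snoc (y :: q) x
    simp only [List.cons_append, Mx] at *
    rw [ih]
    have hE : E (y :: (q ++ [x])) =
        if S (y :: (q ++ [x])) = 1 then ((y :: (q ++ [x])).length : Int) else E (q ++ [x]) := rfl
    rw [hE, hbp]
    by_cases h : S ((y :: q) ++ [x]) = 1
    · simp only [List.cons_append] at h
      rw [if_pos h, if_pos h]
      have h1 := bestPrefix_le (y :: q)
      have h2 := Mx_le q
      have h3 := E_le (q ++ [x])
      simp only [List.length_cons, List.length_append, List.length_cons, List.length_nil] at *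
      push_cast at *
      omega
    · simp only [List.cons_append] at h
      rw [if_neg h, if_neg h]
      omega

theorem solveLoop_eq (ys : List Int) : ∀ r : Int, 0 ≤ r → solveLoop r ys = max r (Mx ys) := by
  induction ys with
  | nil => intro r hr; simp only [solveLoop, Mx]; omega
  | cons y ys ih =>
    intro r hr
    have hbp := bestPrefix_nonneg (y :: ys)
    rw [solveLoop, ih _ (by omega), Mx, max_assoc]

theorem solve_alt_eq_Mx (numbers : List Int) : solve_alt numbers = Mx numbers := by
  unfold solve_alt
  rw [solveLoop_eq numbers 0 le_rfl]
  exact max_eq_right (Mx_nonneg numbers)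

theorem firstK_snoc (p : List Int) (x : Int) (v : Int) :
    firstK (p ++ [x]) v =
      match firstK p v with
      | some k => some k
      | none => if S (p ++ [x]) = v then some ((p.length : Int) + 1) else none := by
  induction p generalizing v with
  | nil =>
    by_cases h : v = 0
    · simp [firstK, h]
    · have hS : S ([] ++ [x]) = t x := by simp [S, t]
      have hSx : S [x] = t x := by simp [S]
      by_cases h2 : t x = v
      · have h3 : v - t x = 0 := by omega
        simp [firstK, h, hSx, h2]
      · have h3 : v - t x ≠ 0 := by omega
        simp [firstK, h, h3, hSx, h2]
  | cons y q ih =>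
    simp only [List.cons_append, firstK]
    by_cases h : v = 0
    · simp [h]
    · rw [if_neg h, if_neg h, ih (v - t y)]
      cases hfk : firstK q (v - t y) with
      | some k => simp
      | none =>
        simp only [Option.map_none]
        by_cases h2 : S (y :: (q ++ [x])) = v
        · have hs : S (q ++ [x]) = v - t y := by
            rw [S_cons] at h2; omega
          rw [if_pos hs, if_pos h2]
          simp only [Option.map_some, List.length_cons, Option.some.injEq]
          push_cast; ring
        · have hs : ¬ S (q ++ [x]) = v - t y := by
            rw [S_cons] at h2; omega
          rw [if_neg hs, if_neg h2]
          simp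

theorem E_eq_firstK (p : List Int) (x : Int) :
    E (p ++ [x]) =
      match firstK p (S (p ++ [x]) - 1) with
      | some k => (p.length : Int) + 1 - k
      | none => 0 := by
  induction p generalizing x with
  | nil =>
    simp only [List.nil_append, E, S_cons, S_nil, firstK, t]
    by_cases h : x = 1 <;> simp [h]
  | cons y q ih =>
    simp only [List.cons_append, E]
    have hS : S (y :: (q ++ [x])) = t y + S (q ++ [x]) := S_cons y (q ++ [x])
    by_cases h : S (y :: (q ++ [x])) = 1
    · have hv : S (y :: (q ++ [x])) - 1 = 0 := by omega
      rw [if_pos h, hv]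
      simp [firstK]
    · have hv : S (y :: (q ++ [x])) - 1 ≠ 0 := by omega
      rw [if_neg h]
      simp only [firstK, if_neg hv]
      have harg : S (y :: (q ++ [x])) - 1 - t y = S (q ++ [x]) - 1 := by omega
      rw [harg, ih x]
      cases hfk : firstK q (S (q ++ [x]) - 1) with
      | some k =>
        simp only [Option.map_some, List.length_cons]
        push_cast; ring
      | none => simp

-- one step of A preserves the cache characterisation and tracks Mx
theorem foldA_inv (rs : List Int) : ∀ (p : List Int) (cp : PySem.Dict Int Int),
    (∀ v : Int, cp.get? v = (firstK p v).map (· - 1)) →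
    ((PySem.List.enumerate rs (p.length : Int)).foldl stepA (Mx p, cp, S p)).1 = Mx (p ++ rs) := by
  induction rs with
  | nil => intro p cp _; simp
  | cons r rs ih =>
    intro p cp hcp
    rw [PySem.List.enumerate_cons, List.foldl_cons]
    have hcurr : (stepA (Mx p, cp, S p) ((p.length : Int), r)).2.2 = S (p ++ [r]) := by
      simp [stepA, S_append, S_cons, S_nil, t]
    -- the updated cache
    set curr : Int := S p + (if r = 1 then 1 else -1) with hcurrdef
    have hcurrS : curr = S (p ++ [r]) := by simp [S_append, S_cons, S_nil, t, hcurrdef]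
    set cache' := if cp.contains curr then cp else cp.insert curr (p.length : Int) with hc'
    have hcontains : cp.contains curr = (firstK p curr).isSome := by
      rw [PySem.Dict.contains_eq_isSome_get?, hcp curr]
      cases firstK p curr <;> simp
    have hcache' : ∀ v : Int, cache'.get? v = (firstK (p ++ [r]) v).map (· - 1) := by
      intro v
      rw [firstK_snoc]
      by_cases hin : cp.contains curr = true
      · have hsome : (firstK p curr).isSome := by rw [← hcontains]; exact hin
        rw [hc', if_pos hin, hcp v]
        cases hv : firstK p v with
        | some k => simp
        | none =>
          simp only [Option.map_none]
          by_cases hveq : S (p ++ [r]) = v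
          · exfalso
            have hvc : v = curr := by rw [hcurrS]; omega
            rw [hvc] at hv
            rw [hv] at hsome
            simp at hsome
          · rw [if_neg hveq]; rfl
      · have hnone : firstK p curr = none := by
          cases hfk : firstK p curr with
          | none => rfl
          | some k => rw [hcontains, hfk] at hin; simp at hin
        rw [hc', if_neg hin, PySem.Dict.get?_insert]
        by_cases hveq : v = curr
        · subst hveq
          rw [if_pos rfl, hnone]
          simp only []
          rw [if_pos hcurrS.symm]
          simp
        · rw [if_neg hveq, hcp v]
          cases hv : firstK p v with
          | some k => simp
          | none =>
            simp only [Option.map_none]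
            have : S (p ++ [r]) ≠ v := by rw [← hcurrS]; exact fun hh => hveq hh.symm
            rw [if_neg this]; rfl
    -- the new result equals Mx (p ++ [r])
    have hres : (stepA (Mx p, cp, S p) ((p.length : Int), r)).1 = Mx (p ++ [r]) := by
      show (match cache'.get? (curr - 1) with
            | some c => max (Mx p) ((p.length : Int) - c)
            | none => Mx p) = Mx (p ++ [r])
      rw [hcache' (curr - 1)]
      have hfk1 : firstK (p ++ [r]) (curr - 1) = firstK p (curr - 1) := by
        rw [firstK_snoc]
        cases hfk : firstK p (curr - 1) with
        | some k => rfl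
        | none =>
          simp only []
          rw [if_neg (by rw [← hcurrS]; omega)]
      rw [hfk1, Mx_snoc]
      have hEfk := E_eq_firstK p r
      rw [hcurrS] at *
      cases hfk : firstK p (S (p ++ [r]) - 1) with
      | some k =>
        rw [hfk] at hEfk
        have hE' : E (p ++ [r]) = (p.length : Int) + 1 - k := by rw [hEfk]
        simp only [Option.map_some]
        rw [hE']
        congr 1
        omega
      | none =>
        rw [hfk] at hEfk
        have hE0 : E (p ++ [r]) = 0 := by rw [hEfk]
        simp only [Option.map_none]
        rw [hE0]
        exact (max_eq_left (Mx_nonneg p)).symm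
    have hstep : stepA (Mx p, cp, S p) ((p.length : Int), r) = (Mx (p ++ [r]), cache', S (p ++ [r])) := by
      refine Prod.ext hres (Prod.ext ?_ ?_)
      · rfl
      · exact hcurr
    rw [hstep]
    have hlen : (p.length : Int) + 1 = ((p ++ [r]).length : Int) := by simp
    rw [hlen, ih (p ++ [r]) cache' hcache']
    simp

theorem solve_eq_Mx (numbers : List Int) : solve numbers = Mx numbers := by
  unfold solve
  have hinit : ∀ v : Int, (PySem.Dict.empty.insert (0 : Int) (-1 : Int)).get? v
      = (firstK ([] : List Int) v).map (· - 1) := by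
    intro v
    rw [PySem.Dict.get?_insert]
    by_cases h : v = 0
    · simp [h, firstK]
    · simp [h, firstK, PySem.Dict.get?_empty]
  have := foldA_inv numbers [] (PySem.Dict.empty.insert 0 (-1)) hinit
  simpa [Mx, S_nil] using this

-- ===== VERDICT (by name: the statement is the Claim_ definition above) =====
theorem solve_spec : Claim_equal_solve := by
  intro numbers _
  unfold Spec_solve
  rw [solve_eq_Mx, solve_alt_eq_Mx]
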